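-- pv_equiv track=rewrite | github.com/areddy1805/rag_api_assistant | backend/retrieval/core/metadata_search.py | metadata_search
-- ===== SOURCE A (Python) =====
-- def metadata_search(chunks, entities):
--
--     if not entities:
--         return []
--
--     results = []
--
--     for chunk in chunks:
--
--         match = True
--
--         if "endpoint" in entities:
--             if chunk.get("endpoint") != entities["endpoint"]:
--                 match = False
--
--         if "http_method" in entities:
--             if chunk.get("http_method") != entities["http_method"]:
--                 match = False
--
--         if match:
--             results.append(chunk)
--
--     return results
-- ===== SOURCE B (Python) =====
-- def metadata_search(chunks, entities):
--     if not entities: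
--         return []
--     # staged narrowing: each relevant key, if present, filters the surviving
--     # candidate list in its own pass (instead of one pass testing all keys)
--     candidates = list(chunks)
--     for key in ("endpoint", "http_method"):
--         if key in entities:
--             wanted = entities[key]
--             candidates = [c for c in candidates if c.get(key) == wanted]
--     return candidates
-- ===== Notes on version B (the rewrite author's own statement) =====
-- stated objective: alternative
-- what changed: Replaces the single pass that tests both hardcoded fields per chunk via a mutable match flag with a staged filtering pipeline: each relevant entity key, if present, narrows the surviving candidate list in its own pass.
import Mathlib
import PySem

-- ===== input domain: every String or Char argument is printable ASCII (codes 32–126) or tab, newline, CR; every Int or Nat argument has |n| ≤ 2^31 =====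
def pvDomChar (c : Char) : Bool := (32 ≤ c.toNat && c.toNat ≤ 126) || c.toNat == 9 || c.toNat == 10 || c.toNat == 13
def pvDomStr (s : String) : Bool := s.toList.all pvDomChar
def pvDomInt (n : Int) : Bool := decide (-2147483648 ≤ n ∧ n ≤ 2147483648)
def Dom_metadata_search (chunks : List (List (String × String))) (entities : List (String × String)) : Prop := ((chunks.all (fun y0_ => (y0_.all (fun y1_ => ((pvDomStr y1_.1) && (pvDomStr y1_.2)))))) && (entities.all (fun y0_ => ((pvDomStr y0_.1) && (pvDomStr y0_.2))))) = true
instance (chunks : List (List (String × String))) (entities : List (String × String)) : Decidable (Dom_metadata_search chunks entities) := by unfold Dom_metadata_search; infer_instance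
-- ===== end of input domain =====

-- B replaces A's single pass testing both hardcoded fields via a mutable match flag
-- with a staged filtering pipeline: each relevant key narrows the candidates in its own pass.

-- ===== PORT A =====
-- dict is an association list: 'k in d' / d[k] / d.get(k) = first-match lookup.
-- A's per-chunk 'match' flag, computed by the same two sequential branch blocks.
def pvMatchA (entities chunk : List (String × String)) : Bool :=
  let m0 := true
  let m1 := match entities.lookup "endpoint" with
    | some v => if chunk.lookup "endpoint" ≠ some v then false else m0
    | none => m0
  let m2 := match entities.lookup "http_method" with
    | some v => if chunk.lookup "http_method" ≠ some v then false else m1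
    | none => m1
  m2

def metadata_search (chunks : List (List (String × String))) (entities : List (String × String)) : List (List (String × String)) :=
  if entities.isEmpty then []
  else
    chunks.foldl (fun results chunk =>
      if pvMatchA entities chunk then results ++ [chunk] else results) []

-- ===== PORT B =====
-- one narrowing stage of Source B's loop body: if key in entities, keep only matching candidates
def pvStageB (entities : List (String × String)) (cand : List (List (String × String))) (key : String) : List (List (String × String)) :=
  match entities.lookup key with
  | some wanted => cand.filter (fun c => c.lookup key == some wanted)
  | none => cand

def metadata_search_alt (chunks : List (List (String × String))) (entities : List (String × String)) : List (List (String × String)) :=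
  if entities.isEmpty then []
  else ["endpoint", "http_method"].foldl (pvStageB entities) chunks

-- ===== PRECONDITION & SPEC =====
def Spec_metadata_search (chunks : List (List (String × String))) (entities : List (String × String)) (out : List (List (String × String))) : Prop := out = metadata_search_alt chunks entities
instance (chunks : List (List (String × String))) (entities : List (String × String)) (out : List (List (String × String))) : Decidable (Spec_metadata_search chunks entities out) := by unfold Spec_metadata_search; infer_instance

-- ===== CLAIM (what is proved, stated in full; the proofs are below) =====
def Claim_equal_metadata_search : Prop := ∀ (chunks : List (List (String × String))) (entities : List (String × String)), Dom_metadata_search chunks entities → Spec_metadata_search chunks entities (metadata_search chunks entities)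

-- ===== LEMMAS AND PROOFS =====
-- B's two staged passes produce exactly the chunks on which A's sequential match flag is true
lemma stages_eq_filter (entities : List (String × String)) (chunks : List (List (String × String))) :
    ["endpoint", "http_method"].foldl (pvStageB entities) chunks
    = chunks.filter (pvMatchA entities) := by
  simp only [List.foldl, pvStageB]
  cases h1 : entities.lookup "endpoint" <;> cases h2 : entities.lookup "http_method"
  · exact (List.filter_eq_self.mpr (fun c _ => by simp [pvMatchA, h1, h2])).symm
  · exact List.filter_congr (fun c _ => by rw [Bool.eq_iff_iff]; simp [pvMatchA, h1, h2])
  · exact List.filter_congr (fun c _ => by rw [Bool.eq_iff_iff]; simp [pvMatchA, h1, h2])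
  · dsimp only
    rw [List.filter_filter]
    exact List.filter_congr (fun c _ => by
      rw [Bool.eq_iff_iff]; simp [pvMatchA, h1, h2, and_comm])

-- ===== VERDICT (by name: the statement is the Claim_ definition above) =====
theorem metadata_search_spec : Claim_equal_metadata_search := by
  intro chunks entities _
  unfold Spec_metadata_search metadata_search metadata_search_alt
  by_cases he : entities.isEmpty
  · simp [he]
  · simp only [he, if_false, Bool.false_eq_true]
    rw [PySem.List.foldl_append_if_eq_filter, List.nil_append, stages_eq_filter]
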